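-- pv_equiv track=rewrite | github.com/Chunkys0up7/docascode | mcp_server/core/transformer.py | text_to_markdown
-- ===== SOURCE A (Python) =====
-- from typing import Any, Dict, Optional
--
-- def text_to_markdown(content: str, options: Dict[str, Any]) -> str:
--     """Convert plain text to Markdown (minimal formatting)."""
--     # Add paragraph breaks
--     lines = content.split("\n")
--     paragraphs = []
--     current = []
--
--     for line in lines:
--         stripped = line.strip()
--         if not stripped:
--             if current:
--                 paragraphs.append(" ".join(current))
--                 current = []
--         else:
--             current.append(stripped)
--
--     if current:
--         paragraphs.append(" ".join(current))
--
--     return "\n\n".join(paragraphs)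
-- ===== SOURCE B (Python) =====
-- from itertools import groupby
--
--
-- def text_to_markdown(content: str, options) -> str:
--     """Convert plain text to Markdown (minimal formatting).
--
--     Groups consecutive non-blank lines with itertools.groupby instead of a
--     manual accumulator with explicit flushes.
--     """
--     paragraphs = [
--         " ".join(line.strip() for line in group)
--         for blank, group in groupby(content.split("\n"), key=lambda l: not l.strip())
--         if not blank
--     ]
--     return "\n\n".join(paragraphs)
-- ===== Notes on version B (the rewrite author's own statement) =====
-- stated objective: idiomatic
-- what changed: Replaces the manual current-paragraph accumulator with its in-loop and post-loop flushes by itertools.groupby over the lines keyed on blankness, joining each non-blank run in a comprehension.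
import Mathlib
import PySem

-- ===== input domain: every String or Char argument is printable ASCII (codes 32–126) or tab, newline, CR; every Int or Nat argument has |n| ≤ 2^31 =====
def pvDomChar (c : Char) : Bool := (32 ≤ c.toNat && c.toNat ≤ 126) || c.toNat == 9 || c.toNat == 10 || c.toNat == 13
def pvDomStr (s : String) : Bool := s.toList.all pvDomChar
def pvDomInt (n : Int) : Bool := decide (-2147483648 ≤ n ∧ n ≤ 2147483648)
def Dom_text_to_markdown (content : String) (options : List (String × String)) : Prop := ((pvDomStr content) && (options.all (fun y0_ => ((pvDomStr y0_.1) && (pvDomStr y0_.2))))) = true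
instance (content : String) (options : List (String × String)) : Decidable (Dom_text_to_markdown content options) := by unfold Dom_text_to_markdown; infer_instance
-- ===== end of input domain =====

-- B replaces A's manual accumulator with a groupby-style grouping of the lines
-- into maximal runs of equal blankness (objective: idiomatic).

-- ===== PORT A =====
-- content.split("\n"): sep "\n" is nonempty, so split? is always some; getD never fires
def text_to_markdown (content : String) (options : List (String × String)) : String :=
  let lines := (PySem.Str.split? content "\n").getD []
  let st := lines.foldl
    (fun (pc : List String × List String) line =>
      let stripped := PySem.Str.strip line
      if stripped = "" then
        if pc.2 = [] then pc
        else (pc.1 ++ [PySem.Str.join " " pc.2], ([] : List String))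
      else (pc.1, pc.2 ++ [stripped]))
    ([], [])
  let paragraphs := if st.2 = [] then st.1 else st.1 ++ [PySem.Str.join " " st.2]
  PySem.Str.join "\n\n" paragraphs

-- ===== PORT B =====

def pvBlank (l : String) : Bool := PySem.Str.strip l == ""

def pvGroupBlank : List String → List (List String)
  | [] => []
  | l :: ls =>
    (l :: ls.takeWhile (fun x => pvBlank x == pvBlank l)) ::
      pvGroupBlank (ls.dropWhile (fun x => pvBlank x == pvBlank l))
termination_by ls => ls.length
decreasing_by
  simp only [List.length_cons]
  exact Nat.lt_succ_of_le (List.length_dropWhile_le _ _)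


def text_to_markdown_alt (content : String) (options : List (String × String)) : String :=
  let paragraphs :=
    ((pvGroupBlank ((PySem.Str.split? content "\n").getD [])).filter
        (fun g => !pvBlank (g.headD ""))).map
      (fun g => PySem.Str.join " " (g.map PySem.Str.strip))
  PySem.Str.join "\n\n" paragraphs

-- ===== PRECONDITION & SPEC =====
def Spec_text_to_markdown (content : String) (options : List (String × String)) (out : String) : Prop := out = text_to_markdown_alt content options
instance (content : String) (options : List (String × String)) (out : String) : Decidable (Spec_text_to_markdown content options out) := by unfold Spec_text_to_markdown; infer_instance

-- ===== CLAIM (what is proved, stated in full; the proofs are below) =====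
def Claim_equal_text_to_markdown : Prop := ∀ (content : String) (options : List (String × String)), Dom_text_to_markdown content options → Spec_text_to_markdown content options (text_to_markdown content options)

-- ===== LEMMAS AND PROOFS =====
def parasB (ls : List String) : List String :=
  ((pvGroupBlank ls).filter (fun g => !pvBlank (g.headD ""))).map
    (fun g => PySem.Str.join " " (g.map PySem.Str.strip))

lemma parasB_cons_blank (l : String) (ls : List String) (h : pvBlank l = true) :
    parasB (l :: ls) = parasB (ls.dropWhile pvBlank) := by
  have hk : (fun x => pvBlank x == pvBlank l) = pvBlank := by
    funext x; simp [h]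
  simp only [parasB, pvGroupBlank, hk]
  simp [List.filter, h]

lemma parasB_dropWhile (ls : List String) :
    parasB (ls.dropWhile pvBlank) = parasB ls := by
  cases ls with
  | nil => rfl
  | cons l ls =>
    by_cases h : pvBlank l = true
    · rw [List.dropWhile_cons_of_pos h, parasB_cons_blank l ls h]
    · rw [List.dropWhile_cons_of_neg (by simp [h])]

lemma parasB_cons_nonblank (l : String) (ls : List String) (h : pvBlank l = false) :
    parasB (l :: ls) =
      PySem.Str.join " " ((l :: ls.takeWhile (fun x => !pvBlank x)).map PySem.Str.strip)
        :: parasB (ls.dropWhile (fun x => !pvBlank x)) := by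
  have hk : (fun x => pvBlank x == pvBlank l) = (fun x => !pvBlank x) := by
    funext x; simp [h]
  simp only [parasB, pvGroupBlank, hk]
  simp [List.filter, h]

def parasA (cur : List String) : List String → List String
  | [] => if cur = [] then [] else [PySem.Str.join " " cur]
  | l :: ls =>
    if PySem.Str.strip l = "" then
      if cur = [] then parasA [] ls else PySem.Str.join " " cur :: parasA [] ls
    else parasA (cur ++ [PySem.Str.strip l]) ls

lemma parasA_eq_parasB (ls : List String) :
    parasA [] ls = parasB ls ∧
      ∀ cur, cur ≠ [] →
        parasA cur ls =
          PySem.Str.join " " (cur ++ (ls.takeWhile (fun x => !pvBlank x)).map PySem.Str.strip)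
            :: parasB (ls.dropWhile (fun x => !pvBlank x)) := by
  induction ls with
  | nil =>
    refine ⟨by simp [parasA, parasB, pvGroupBlank], fun cur hc => ?_⟩
    simp [parasA, hc, parasB, pvGroupBlank]
  | cons l ls ih =>
    by_cases hb : pvBlank l = true
    · have hs : PySem.Str.strip l = "" := by simpa [pvBlank] using hb
      constructor
      · rw [parasA]
        simp [hs, ih.1, parasB_cons_blank l ls hb, parasB_dropWhile]
      · intro cur hc
        rw [parasA]
        rw [List.takeWhile_cons_of_neg (by simp [hb]),
          List.dropWhile_cons_of_neg (by simp [hb])]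
        simp [hs, hc, ih.1, parasB_cons_blank l ls hb, parasB_dropWhile]
    · have hbf : pvBlank l = false := by simpa using hb
      have hs : PySem.Str.strip l ≠ "" := by simpa [pvBlank] using hbf
      constructor
      · rw [parasA]
        rw [parasB_cons_nonblank l ls hbf]
        simp only [hs, List.nil_append]
        rw [ih.2 [PySem.Str.strip l] (by simp)]
        simp
      · intro cur hc
        rw [parasA]
        rw [List.takeWhile_cons_of_pos (by simp [hbf]),
          List.dropWhile_cons_of_pos (by simp [hbf])]
        simp only [hs]
        rw [ih.2 (cur ++ [PySem.Str.strip l]) (by simp)]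
        simp

lemma foldA_eq_parasA (ls : List String) : ∀ (ps cur : List String),
    (if (ls.foldl
        (fun (pc : List String × List String) line =>
          let stripped := PySem.Str.strip line
          if stripped = "" then
            if pc.2 = [] then pc
            else (pc.1 ++ [PySem.Str.join " " pc.2], ([] : List String))
          else (pc.1, pc.2 ++ [stripped]))
        (ps, cur)).2 = []
      then (ls.foldl
        (fun (pc : List String × List String) line =>
          let stripped := PySem.Str.strip line
          if stripped = "" then
            if pc.2 = [] then pc
            else (pc.1 ++ [PySem.Str.join " " pc.2], ([] : List String))
          else (pc.1, pc.2 ++ [stripped]))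
        (ps, cur)).1
      else (ls.foldl
        (fun (pc : List String × List String) line =>
          let stripped := PySem.Str.strip line
          if stripped = "" then
            if pc.2 = [] then pc
            else (pc.1 ++ [PySem.Str.join " " pc.2], ([] : List String))
          else (pc.1, pc.2 ++ [stripped]))
        (ps, cur)).1 ++ [PySem.Str.join " " (ls.foldl
        (fun (pc : List String × List String) line =>
          let stripped := PySem.Str.strip line
          if stripped = "" then
            if pc.2 = [] then pc
            else (pc.1 ++ [PySem.Str.join " " pc.2], ([] : List String))
          else (pc.1, pc.2 ++ [stripped]))
        (ps, cur)).2])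
    = ps ++ parasA cur ls := by
  induction ls with
  | nil =>
    intro ps cur
    simp only [List.foldl_nil, parasA]
    by_cases hc : cur = [] <;> simp [hc]
  | cons l ls ih =>
    intro ps cur
    simp only [List.foldl_cons, parasA]
    by_cases hb : PySem.Str.strip l = ""
    · by_cases hc : cur = [] <;> simp [hb, hc, ih]
    · simp [hb, ih]

-- ===== VERDICT (by name: the statement is the Claim_ definition above) =====
theorem text_to_markdown_spec : Claim_equal_text_to_markdown := by
  intro content options _
  unfold Spec_text_to_markdown
  simp only [text_to_markdown, text_to_markdown_alt]
  rw [foldA_eq_parasA ((PySem.Str.split? content "\n").getD []) [] [],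
    (parasA_eq_parasB ((PySem.Str.split? content "\n").getD [])).1]
  rfl
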